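-- pv_equiv track=rewrite | github.com/9b2n/coding-test | 프로그래머스/1단계/둘만의 암호.py | solution
-- ===== SOURCE A (Python) =====
-- def solution(s, skip, index):
--     answer = []
--     skip = set(skip)
--     arr = [chr(ord('a') + i) in skip for i in range(26)]
--
--     for alpha in s:
--         diff = index
--         original = ord(alpha) - ord('a') + 1
--         while diff:
--             if not arr[original % 26]:
--                 diff -= 1
--
--             original += 1
--
--         answer.append(chr(ord('a') + (original - 1) % 26))
--
--     return "".join(answer)
-- ===== SOURCE B (Python) =====
-- def solution(s, skip, index):
--     skipset = set(skip)
--     valid = [i for i in range(26) if chr(97 + i) not in skipset]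
--     if index == 0:
--         table = [chr(97 + p) for p in range(26)]
--     else:
--         m = len(valid)
--         table = []
--         for p in range(26):
--             j = sum(1 for v in valid if v <= p)
--             table.append(chr(97 + valid[(j + index - 1) % m]))
--     return "".join(table[(ord(c) - 97) % 26] for c in s)
-- ===== Notes on version B (the rewrite author's own statement) =====
-- stated objective: faster
-- what changed: A walks the alphabet one step at a time per character (index iterations each); B precomputes the ordered list of non-skipped letters once and builds a 26-entry answer table by a modular-arithmetic jump, then maps each character through the table.
import Mathlib
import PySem

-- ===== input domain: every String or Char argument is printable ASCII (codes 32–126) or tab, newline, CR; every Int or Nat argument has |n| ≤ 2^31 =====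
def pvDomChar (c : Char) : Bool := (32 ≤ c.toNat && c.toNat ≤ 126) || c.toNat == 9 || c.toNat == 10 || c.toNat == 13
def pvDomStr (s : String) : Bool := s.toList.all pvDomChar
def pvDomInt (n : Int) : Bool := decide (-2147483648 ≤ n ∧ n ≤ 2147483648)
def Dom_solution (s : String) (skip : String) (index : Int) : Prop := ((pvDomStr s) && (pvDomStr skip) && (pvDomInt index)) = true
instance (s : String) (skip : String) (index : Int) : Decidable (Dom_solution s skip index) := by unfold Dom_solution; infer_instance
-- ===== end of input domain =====

-- B replaces A's per-character step-by-step alphabet walk by a 26-entry answer table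
-- computed once with modular arithmetic over the ordered valid-letter list (objective:
-- faster). Equivalence of return values is proved on Pre_ (A's loop diverges outside it).

-- ===== PORT A =====
-- A's while loop; the fuel 26*index suffices under Pre_ (proved below); in Python the
-- loop DIVERGES when index < 0, or when index > 0 and all 26 letters are skipped —
-- exactly the inputs Pre_solution excludes.
def loopA (arr : List Bool) : Nat → Int → Int → Int
  | 0, _, o => o
  | fuel + 1, d, o =>
    if d ≠ 0 then
      loopA arr fuel (if !(PySem.List.pyGetD arr (PySem.Int.mod o 26) false) then d - 1 else d) (o + 1)
    else o

def solution (s : String) (skip : String) (index : Int) : String :=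
  let skipSet : PySem.Set Char := PySem.Set.ofList skip.toList
  let arr : List Bool := (List.range 26).map (fun i => PySem.Set.contains skipSet (Char.ofNat (97 + i)))
  String.ofList (s.toList.map (fun alpha =>
    let original : Int := (alpha.toNat : Int) - 97 + 1
    let o := loopA arr (26 * index.toNat) index original
    Char.ofNat (97 + (PySem.Int.mod (o - 1) 26).toNat)))

-- ===== PORT B =====
def solution_alt (s : String) (skip : String) (index : Int) : String :=
  let skipSet : PySem.Set Char := PySem.Set.ofList skip.toList
  let valid : List Nat := (List.range 26).filter (fun i => !(PySem.Set.contains skipSet (Char.ofNat (97 + i))))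
  let table : List Char :=
    if index = 0 then
      (List.range 26).map (fun p => Char.ofNat (97 + p))
    else
      (List.range 26).map (fun p =>
        Char.ofNat (97 + PySem.List.pyGetD valid
          (PySem.Int.mod (((valid.filter (fun v => v ≤ p)).length : Int) + index - 1) ((valid.length : Int))) 0))
  String.ofList (s.toList.map (fun c =>
    PySem.List.pyGetD table (PySem.Int.mod ((c.toNat : Int) - 97) 26) ' '))

-- ===== PRECONDITION & SPEC =====
-- Pre_ excludes exactly the inputs on which A's while loop never terminates (A returns
-- no value there): a nonempty s together with a negative index, or with a positive
-- index when all 26 lowercase letters occur in skip.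
def Pre_solution (s : String) (skip : String) (index : Int) : Prop :=
  s.toList = [] ∨ (0 ≤ index ∧ (index = 0 ∨ ∃ i ∈ List.range 26, Char.ofNat (97 + i) ∉ skip.toList))
instance (s : String) (skip : String) (index : Int) : Decidable (Pre_solution s skip index) := by unfold Pre_solution; infer_instance

def pvWitness_solution : String × String × Int := ("hello, world!", "abqz", 7)

def Spec_solution (s : String) (skip : String) (index : Int) (out : String) : Prop := out = solution_alt s skip index
instance (s : String) (skip : String) (index : Int) (out : String) : Decidable (Spec_solution s skip index out) := by unfold Spec_solution; infer_instance

-- ===== CLAIM (what is proved, stated in full; the proofs are below) =====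
def Claim_equal_solution : Prop := ∀ (s : String) (skip : String) (index : Int), Dom_solution s skip index → Pre_solution s skip index → Spec_solution s skip index (solution s skip index)

-- ===== LEMMAS AND PROOFS =====

def validL (f : Nat → Bool) : List Nat := (List.range 26).filter (fun i => !f i)
def cntL (f : Nat → Bool) (p : Nat) : Nat := ((validL f).filter (fun v => v ≤ p)).length

theorem cntL_eq_range (f : Nat → Bool) (p : Nat) (hp : p < 26) :
    cntL f p = ((List.range (p + 1)).filter (fun i => !f i)).length := by
  unfold cntL validL
  rw [List.filter_filter]
  have h26 : 26 = (p + 1) + (25 - p) := by omega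
  rw [h26, List.range_add, List.filter_append]
  have h1 : (List.range (p+1)).filter (fun a => decide (a ≤ p) && !f a)
      = (List.range (p+1)).filter (fun i => !f i) := by
    apply List.filter_congr
    intro x hx
    simp at hx
    simp [hx]
  have h2 : ((List.range (25-p)).map (fun x => (p+1) + x)).filter (fun a => decide (a ≤ p) && !f a) = [] := by
    rw [List.filter_eq_nil_iff]
    intro a ha
    simp at ha
    obtain ⟨x, hx, rfl⟩ := ha
    simp; omega
  rw [h1, h2]
  simp

theorem cntL_25 (f : Nat → Bool) : cntL f 25 = (validL f).length := by
  unfold cntL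
  congr 1
  apply List.filter_eq_self.mpr
  intro a ha
  unfold validL at ha
  simp at ha ⊢
  omega

theorem cntL_succ (f : Nat → Bool) (p : Nat) (hp : p + 1 < 26) :
    cntL f (p + 1) = cntL f p + (if f (p + 1) then 0 else 1) := by
  rw [cntL_eq_range f p (by omega), cntL_eq_range f (p+1) hp, List.range_succ, List.filter_append]
  simp
  cases h : f (p+1) <;> simp [h]

theorem cntL_zero (f : Nat → Bool) : cntL f 0 = if f 0 then 0 else 1 := by
  rw [cntL_eq_range f 0 (by omega)]
  cases h : f 0 <;> simp [List.range_succ, h]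

theorem validL_get_cnt (f : Nat → Bool) (p : Nat) (hp : p + 1 < 26) (hf : f (p + 1) = false) :
    cntL f p < (validL f).length ∧ (validL f).getD (cntL f p) 0 = p + 1 := by
  have hd : validL f = (List.range (p+1)).filter (fun i => !f i)
      ++ (p+1) :: ((List.range (24-p)).map (fun x => (p+2) + x)).filter (fun i => !f i) := by
    unfold validL
    have h26 : 26 = (p + 2) + (24 - p) := by omega
    rw [h26, List.range_add, List.filter_append, List.range_succ, List.filter_append]
    simp [hf]
  have hc := cntL_eq_range f p (by omega)
  constructor
  · rw [hd]; simp [hc]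
  · rw [hd, hc, List.getD_eq_getElem?_getD, List.getElem?_append_right (by simp)]
    simp

theorem validL_get_zero (f : Nat → Bool) (hf : f 0 = false) :
    0 < (validL f).length ∧ (validL f).getD 0 0 = 0 := by
  have hd : validL f = 0 :: ((List.range 25).map (fun x => 1 + x)).filter (fun i => !f i) := by
    unfold validL
    have : List.range 26 = 0 :: (List.range 25).map (fun x => 1 + x) := by
      decide
    rw [this]
    simp [hf]
  rw [hd]; simp

theorem seek_exists (f : Nat → Bool) (hex : ∃ i, i < 26 ∧ f i = false) (c : Nat) (hc : c < 26) :
    ∃ t, t ≤ 25 ∧ f ((c + t) % 26) = false := by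
  obtain ⟨i, hi, hfi⟩ := hex
  refine ⟨(i + 26 - c) % 26, by omega, ?_⟩
  have : (c + (i + 26 - c) % 26) % 26 = i := by omega
  rw [this]; exact hfi

theorem arr_get (f : Nat → Bool) (o : Int) :
    PySem.List.pyGetD ((List.range 26).map f) (PySem.Int.mod o 26) false
      = f ((PySem.Int.mod o 26).toNat) := by
  have h0 : (0:Int) ≤ PySem.Int.mod o 26 := PySem.Int.mod_nonneg o (by omega)
  have h1 : PySem.Int.mod o 26 < 26 := PySem.Int.mod_lt o (by omega)
  rw [PySem.List.pyGetD_eq_getElem _ false h0 (by simpa using h1)]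
  have hlt : (PySem.Int.mod o 26).toNat < 26 := by omega
  simp

theorem loopA_zero (arr : List Bool) (fuel : Nat) (o : Int) : loopA arr fuel 0 o = o := by
  cases fuel <;> simp [loopA]

-- position bookkeeping: c = check position, pos = current-letter position
theorem pos_rel (o : Int) :
    (PySem.Int.mod (o - 1) 26).toNat < 26 ∧ (PySem.Int.mod o 26).toNat < 26 ∧
    (PySem.Int.mod o 26).toNat = ((PySem.Int.mod (o - 1) 26).toNat + 1) % 26 := by
  simp only [PySem.Int.mod_eq_emod_of_pos (show (0:Int) < 26 by omega)]
  omega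

theorem loopA_hit (f : Nat → Bool) (n : Nat) (hn : 1 ≤ n) (o : Int) (fuel : Nat)
    (hfuel : 26 * (n - 1) + 1 ≤ fuel)
    (hhit : f ((PySem.Int.mod o 26).toNat) = false)
    (ih : ∀ o' : Int, ∀ fuel' : Nat, 26 * (n - 2) + 26 ≤ fuel' → 2 ≤ n →
      (PySem.Int.mod (loopA ((List.range 26).map f) fuel' ((n - 1 : Nat) : Int) o' - 1) 26).toNat
        = (validL f).getD ((cntL f ((PySem.Int.mod (o' - 1) 26).toNat) + (n - 2)) % (validL f).length) 0) :
    (PySem.Int.mod (loopA ((List.range 26).map f) fuel ((n : Nat) : Int) o - 1) 26).toNat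
      = (validL f).getD ((cntL f ((PySem.Int.mod (o - 1) 26).toNat) + (n - 1)) % (validL f).length) 0 := by
  obtain ⟨fuel', rfl⟩ : ∃ fuel', fuel = fuel' + 1 := ⟨fuel - 1, by omega⟩
  rw [loopA, if_pos (by exact_mod_cast by omega), arr_get f o, hhit]
  simp only [Bool.not_false, if_true]
  set pos := (PySem.Int.mod (o - 1) 26).toNat with hposd
  set c := (PySem.Int.mod o 26).toNat with hcd
  obtain ⟨hpos26, hc26, hcrel⟩ := pos_rel o
  by_cases h2 : 2 ≤ n
  · have hcast : ((n : Nat) : Int) - 1 = ((n - 1 : Nat) : Int) := by omega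
    rw [hcast]
    have := ih (o + 1) fuel' (by omega) h2
    have hpos' : (PySem.Int.mod (o + 1 - 1) 26).toNat = c := by simp [hcd]
    rw [hpos'] at this
    by_cases hp : pos < 25
    · have hsucc := cntL_succ f pos (by omega)
      have hc : c = pos + 1 := by omega
      rw [← hc, hhit] at hsucc
      simp at hsucc
      rw [this, hsucc, show cntL f pos + 1 + (n - 2) = cntL f pos + (n - 1) from by omega]
    · have hpos25 : pos = 25 := by omega
      have hc : c = 0 := by omega
      rw [this, hc, hpos25, cntL_25 f, cntL_zero f]
      rw [hc] at hhit
      rw [hhit]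
      simp
      rw [show 1 + (n - 2) = n - 1 from by omega]
  · have hn1 : n = 1 := by omega
    subst hn1
    simp only [Nat.cast_one]
    rw [show (1:Int) - 1 = 0 by ring, loopA_zero]
    have hres : (PySem.Int.mod (o + 1 - 1) 26).toNat = c := by simp [hcd]
    rw [hres]
    by_cases hp : pos < 25
    · have hc : c = pos + 1 := by omega
      rw [hc] at hhit
      obtain ⟨hlt, hget⟩ := validL_get_cnt f pos (by omega) hhit
      rw [Nat.add_zero, Nat.mod_eq_of_lt hlt, hget, hc]
    · have hpos25 : pos = 25 := by omega
      have hc : c = 0 := by omega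
      rw [hc] at hhit ⊢
      obtain ⟨hlen, hget⟩ := validL_get_zero f hhit
      rw [hpos25, cntL_25 f, Nat.add_zero, Nat.mod_self, hget]

theorem loopA_seek (f : Nat → Bool) (hex : ∃ i, i < 26 ∧ f i = false) :
    ∀ n : Nat, 1 ≤ n → ∀ k : Nat, ∀ o : Int, ∀ fuel : Nat,
    26 * (n - 1) + k + 1 ≤ fuel →
    (∃ t, t ≤ k ∧ f (((PySem.Int.mod o 26).toNat + t) % 26) = false) →
    (PySem.Int.mod (loopA ((List.range 26).map f) fuel ((n : Nat) : Int) o - 1) 26).toNat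
      = (validL f).getD ((cntL f ((PySem.Int.mod (o - 1) 26).toNat) + (n - 1)) % (validL f).length) 0 := by
  intro n
  induction n using Nat.strong_induction_on with
  | _ n IH =>
  intro hn k
  induction k with
  | zero =>
    intro o fuel hfuel hseek
    obtain ⟨t, ht, hft⟩ := hseek
    have ht0 : t = 0 := by omega
    subst ht0
    have hc26 := (pos_rel o).2.1
    rw [Nat.add_zero, Nat.mod_eq_of_lt hc26] at hft
    exact loopA_hit f n hn o fuel (by omega) hft
      (fun o' fuel' hf' h2 => IH (n-1) (by omega) (by omega) 25 o' fuel' (by omega)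
        (seek_exists f hex _ (pos_rel o').2.1))
  | succ k ihk =>
    intro o fuel hfuel hseek
    obtain ⟨hpos26, hc26, hcrel⟩ := pos_rel o
    by_cases hc : f ((PySem.Int.mod o 26).toNat) = false
    · exact loopA_hit f n hn o fuel (by omega) hc
        (fun o' fuel' hf' h2 => IH (n-1) (by omega) (by omega) 25 o' fuel' (by omega)
          (seek_exists f hex _ (pos_rel o').2.1))
    · have hct : f ((PySem.Int.mod o 26).toNat) = true := by
        cases h : f ((PySem.Int.mod o 26).toNat) <;> simp_all
      obtain ⟨fuel', rfl⟩ : ∃ fuel', fuel = fuel' + 1 := ⟨fuel - 1, by omega⟩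
      rw [loopA, if_pos (by exact_mod_cast by omega), arr_get f o, hct]
      simp only [Bool.not_true, Bool.false_eq_true, if_false]
      set pos := (PySem.Int.mod (o - 1) 26).toNat with hposd
      set c := (PySem.Int.mod o 26).toNat with hcd
      -- new seek witness for o+1
      obtain ⟨t, ht, hft⟩ := hseek
      have ht0 : t ≠ 0 := by
        intro h; subst h
        rw [Nat.add_zero, Nat.mod_eq_of_lt hc26] at hft
        simp [hft] at hct
      obtain ⟨hp1, hc1, hcrel1⟩ := pos_rel (o + 1)
      have hposnew : (PySem.Int.mod (o + 1 - 1) 26).toNat = c := by simp [hcd]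
      have hseek' : ∃ t', t' ≤ k ∧ f (((PySem.Int.mod (o+1) 26).toNat + t') % 26) = false := by
        refine ⟨t - 1, by omega, ?_⟩
        have : ((PySem.Int.mod (o+1) 26).toNat + (t-1)) % 26 = (c + t) % 26 := by
          rw [hcrel1, hposnew]
          omega
        rw [this]
        exact hft
      have := ihk (o + 1) fuel' (by omega) hseek'
      rw [hposnew] at this
      rw [this]
      by_cases hp : pos < 25
      · have hcval : c = pos + 1 := by omega
        have hs := cntL_succ f pos (by omega)
        rw [← hcval] at hs
        rw [hct] at hs
        simp at hs
        rw [hs]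
      · have hpos25 : pos = 25 := by omega
        have hcval : c = 0 := by omega
        rw [hcval, hpos25, cntL_25 f, cntL_zero f]
        rw [hcval] at hct
        rw [hct]
        simp [Nat.add_mod_left]

theorem loopA_main (f : Nat → Bool) (hex : ∃ i, i < 26 ∧ f i = false)
    (n : Nat) (hn : 1 ≤ n) (o : Int) (fuel : Nat) (hfuel : 26 * n ≤ fuel) :
    (PySem.Int.mod (loopA ((List.range 26).map f) fuel ((n : Nat) : Int) o - 1) 26).toNat
      = (validL f).getD ((cntL f ((PySem.Int.mod (o - 1) 26).toNat) + (n - 1)) % (validL f).length) 0 := by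
  exact loopA_seek f hex n hn 25 o fuel (by omega) (seek_exists f hex _ (pos_rel o).2.1)

-- bridge: the skip-membership predicate used by both ports
theorem contains_eq_false_iff (skip : String) (c : Char) :
    PySem.Set.contains (PySem.Set.ofList skip.toList) c = false ↔ c ∉ skip.toList := by
  simp [pysem]

-- per-character equality of the two ports, for any skip predicate f
theorem per_char (f : Nat → Bool) (index : Int) (hnn : 0 ≤ index)
    (hor : index = 0 ∨ ∃ i, i < 26 ∧ f i = false) (c : Char) :
    Char.ofNat (97 + (PySem.Int.mod (loopA ((List.range 26).map f) (26 * index.toNat) index ((c.toNat : Int) - 97 + 1) - 1) 26).toNat)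
      = PySem.List.pyGetD
          (if index = 0 then (List.range 26).map (fun p => Char.ofNat (97 + p))
           else (List.range 26).map (fun p =>
             Char.ofNat (97 + PySem.List.pyGetD (validL f)
               (PySem.Int.mod ((((validL f).filter (fun v => v ≤ p)).length : Int) + index - 1) (((validL f).length : Int))) 0)))
          (PySem.Int.mod ((c.toNat : Int) - 97) 26) ' ' := by
  have hmodnn : (0:Int) ≤ PySem.Int.mod ((c.toNat : Int) - 97) 26 := PySem.Int.mod_nonneg _ (by omega)
  have hmodlt : PySem.Int.mod ((c.toNat : Int) - 97) 26 < 26 := PySem.Int.mod_lt _ (by omega)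
  by_cases h0 : index = 0
  · subst h0
    rw [if_pos rfl]
    rw [PySem.List.pyGetD_eq_getElem _ ' ' hmodnn (by simpa using hmodlt)]
    simp only [List.getElem_map, List.getElem_range]
    rw [show (26 : Nat) * (0:Int).toNat = 0 from rfl, loopA_zero,
      show (c.toNat : Int) - 97 + 1 - 1 = (c.toNat : Int) - 97 from by ring]
  · have hpos : 1 ≤ index.toNat := by omega
    have hidx : ((index.toNat : Nat) : Int) = index := Int.toNat_of_nonneg hnn
    have hex : ∃ i, i < 26 ∧ f i = false := by
      rcases hor with h | h
      · exact absurd h h0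
      · exact h
    have hmne : (validL f).length ≠ 0 := by
      obtain ⟨i, hi, hfi⟩ := hex
      have hmem : i ∈ validL f := by
        unfold validL
        simp [hi, hfi]
      intro hlen
      rw [List.length_eq_zero_iff] at hlen
      simp [hlen] at hmem
    rw [if_neg h0]
    rw [PySem.List.pyGetD_eq_getElem _ ' ' hmodnn (by simpa using hmodlt)]
    simp only [List.getElem_map, List.getElem_range]
    have hmain := loopA_main f hex index.toNat hpos ((c.toNat : Int) - 97 + 1) (26 * index.toNat) (by omega)
    rw [hidx] at hmain
    rw [show (c.toNat : Int) - 97 + 1 - 1 = (c.toNat : Int) - 97 from by ring] at hmain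
    rw [hmain]
    congr 2
    have hj : (((validL f).filter (fun v => v ≤ (PySem.Int.mod ((c.toNat : Int) - 97) 26).toNat)).length : Int)
        = ((cntL f ((PySem.Int.mod ((c.toNat : Int) - 97) 26).toNat) : Nat) : Int) := rfl
    rw [hj]
    rw [show ((cntL f ((PySem.Int.mod ((c.toNat : Int) - 97) 26).toNat) : Nat) : Int) + index - 1
        = (((cntL f ((PySem.Int.mod ((c.toNat : Int) - 97) 26).toNat) + (index.toNat - 1) : Nat)) : Int) from by omega]
    rw [PySem.Int.mod_natCast, PySem.List.pyGetD_natCast]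

-- ===== VERDICT (by name: the statement is the Claim_ definition above) =====
theorem solution_spec : Claim_equal_solution := by
  intro s skip index hdom hpre
  unfold Spec_solution
  rcases hpre with hemp | ⟨hnn, hor⟩
  · simp only [solution, solution_alt, hemp, List.map_nil]
  simp only [solution, solution_alt]
  refine congrArg String.ofList (List.map_congr_left ?_)
  intro c _
  refine per_char (fun i => PySem.Set.contains (PySem.Set.ofList skip.toList) (Char.ofNat (97 + i))) index hnn ?_ c
  rcases hor with h | ⟨i, hmem, hnot⟩
  · exact Or.inl h
  · refine Or.inr ⟨i, by simpa using hmem, ?_⟩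
    exact (contains_eq_false_iff skip _).mpr hnot
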